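-- pv_equiv track=rewrite | github.com/figelwump/fin-agent | fin_cli/fin_extract/parsers/pdf_loader.py | _normalize_table
-- ===== SOURCE A (Python) =====
-- from collections.abc import Sequence
--
-- def _normalize_table(
--     raw_table: Sequence[Sequence[str | None]],
-- ) -> tuple[tuple[str, ...], list[tuple[str, ...]]]:
--     rows: list[tuple[str, ...]] = []
--     headers: tuple[str, ...] = ()
--     iterator = iter(raw_table)
--     for row in iterator:
--         cleaned = _clean_row(row)
--         if not headers:
--             headers = cleaned
--             continue
--         if _is_header_row(cleaned, headers):
--             headers = cleaned
--             continue
--         rows.append(cleaned)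
--     return headers, rows
--
-- def _clean_row(row: Sequence[str | None]) -> tuple[str, ...]:
--     return tuple((cell or "").strip() for cell in row)
--
-- def _is_header_row(candidate: Sequence[str], current_headers: Sequence[str]) -> bool:
--     return candidate == current_headers
-- ===== SOURCE B (Python) =====
-- def _normalize_table(raw_table):
--     return _norm(list(raw_table))
--
-- def _norm(rows):
--     # recursively skip rows whose cleaned form is empty until the header is found
--     if not rows:
--         return (), []
--     head = tuple((c or "").strip() for c in rows[0])
--     if not head:
--         return _norm(rows[1:])
--     return head, _body(rows[1:], head)
--
-- def _body(rows, headers):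
--     # recursion on the tail: cons each cleaned row unless it repeats the header
--     if not rows:
--         return []
--     t = tuple((c or "").strip() for c in rows[0])
--     rest = _body(rows[1:], headers)
--     return rest if t == headers else [t] + rest
-- ===== Notes on version B (the rewrite author's own statement) =====
-- stated objective: alternative
-- what changed: Replaces A's single iterative latch-loop with mutable state by two structural recursions: _norm recursively peels leading empty-cleaned rows to fix the header, then _body builds the row list back-to-front through the call stack by consing each cleaned row unless it equals the header; no mutable accumulator, no intermediate list.
import Mathlib
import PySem

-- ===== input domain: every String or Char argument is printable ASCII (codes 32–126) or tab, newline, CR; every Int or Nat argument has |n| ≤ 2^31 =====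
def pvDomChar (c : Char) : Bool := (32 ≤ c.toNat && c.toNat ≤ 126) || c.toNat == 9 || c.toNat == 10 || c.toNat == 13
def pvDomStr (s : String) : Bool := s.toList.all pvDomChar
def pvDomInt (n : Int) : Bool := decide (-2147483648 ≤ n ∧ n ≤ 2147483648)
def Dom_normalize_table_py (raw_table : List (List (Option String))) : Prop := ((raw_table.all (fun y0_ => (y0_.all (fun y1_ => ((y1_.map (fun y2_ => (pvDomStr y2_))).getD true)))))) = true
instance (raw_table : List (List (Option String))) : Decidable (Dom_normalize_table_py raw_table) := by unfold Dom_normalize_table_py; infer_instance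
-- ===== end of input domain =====

-- B replaces A's iterative latch-loop (mutable headers + append accumulator) by two structural
-- recursions: peel leading empty-cleaned rows to fix the header, then cons the remaining cleaned
-- rows through the call stack, skipping repeats of the header (objective: alternative).


-- ===== PORT A =====
-- _clean_row: tuple((cell or "").strip() for cell in row)
def pvCleanRow (row : List (Option String)) : List String :=
  row.map (fun cell => PySem.Str.strip (cell.getD ""))

-- _is_header_row: candidate == current_headers
def pvIsHeaderRow (candidate current_headers : List String) : Bool :=
  candidate == current_headers

-- the body of A's for-loop, as a fold step over the state (headers, rows)
def pvStepA (st : List String × List (List String)) (row : List (Option String)) :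
    List String × List (List String) :=
  let cleaned := pvCleanRow row
  if st.1 = [] then (cleaned, st.2)
  else if pvIsHeaderRow cleaned st.1 then (cleaned, st.2)
  else (st.1, st.2 ++ [cleaned])

def normalize_table_py (raw_table : List (List (Option String))) : List String × List (List String) :=
  raw_table.foldl pvStepA ([], [])

-- ===== PORT B =====
-- _body: recursion on the tail, consing each cleaned row unless it repeats the header
def pvBody (headers : List String) : List (List (Option String)) → List (List String)
  | [] => []
  | r :: rs =>
    let t := r.map (fun c => PySem.Str.strip (c.getD ""))
    let rest := pvBody headers rs
    if t == headers then rest else t :: rest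

-- _norm: recursively peel leading empty-cleaned rows, fixing the header at the first non-empty one
def pvNorm : List (List (Option String)) → List String × List (List String)
  | [] => ([], [])
  | r :: rs =>
    let head := r.map (fun c => PySem.Str.strip (c.getD ""))
    if head = [] then pvNorm rs else (head, pvBody head rs)

def normalize_table_py_alt (raw_table : List (List (Option String))) : List String × List (List String) :=
  pvNorm raw_table

-- ===== PRECONDITION & SPEC =====
def Spec_normalize_table_py (raw_table : List (List (Option String))) (out : List String × List (List String)) : Prop := out = normalize_table_py_alt raw_table
instance (raw_table : List (List (Option String))) (out : List String × List (List String)) : Decidable (Spec_normalize_table_py raw_table out) := by unfold Spec_normalize_table_py; infer_instance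

-- ===== CLAIM (what is proved, stated in full; the proofs are below) =====
def Claim_equal_normalize_table_py : Prop := ∀ (raw_table : List (List (Option String))), Dom_normalize_table_py raw_table → Spec_normalize_table_py raw_table (normalize_table_py raw_table)

-- ===== LEMMAS AND PROOFS =====

-- once the header is a non-empty tuple it never changes; A's loop appends exactly the cleaned rows ≠ header,
-- which is what pvBody conses back-to-front
lemma pv_foldl_fixed (h : List String) (hne : h ≠ []) (rs : List (List String))
    (l : List (List (Option String))) :
    l.foldl pvStepA (h, rs) = (h, rs ++ pvBody h l) := by
  induction l generalizing rs with
  | nil => simp [pvBody]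
  | cons row rest ih =>
    simp only [List.foldl_cons, pvBody]
    by_cases hc : pvCleanRow row = h
    · have h2 := ih rs
      simp only [pvStepA, pvIsHeaderRow, pvCleanRow] at *
      simp [hne, hc, h2]
    · have h2 := ih (rs ++ [pvCleanRow row])
      simp only [pvStepA, pvIsHeaderRow, pvCleanRow] at *
      simp [hne, hc, h2]

lemma pv_main (raw : List (List (Option String))) :
    normalize_table_py raw = normalize_table_py_alt raw := by
  induction raw with
  | nil => rfl
  | cons row rest ih =>
    by_cases hc : pvCleanRow row = []
    · -- empty cleaned row before any header: both sides skip it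
      have hA : normalize_table_py (row :: rest) = normalize_table_py rest := by
        simp only [normalize_table_py, List.foldl_cons]
        congr 1
        simp [pvStepA, hc]
      have hB : normalize_table_py_alt (row :: rest) = normalize_table_py_alt rest := by
        simp only [normalize_table_py_alt, pvNorm]
        simp [pvCleanRow] at hc
        simp [hc]
      rw [hA, hB, ih]
    · -- first non-empty cleaned row: it becomes the fixed header on both sides
      have h1 : pvStepA ([], []) row = (pvCleanRow row, []) := by simp [pvStepA]
      have hA : normalize_table_py (row :: rest)
          = (pvCleanRow row, pvBody (pvCleanRow row) rest) := by
        simp only [normalize_table_py, List.foldl_cons, h1]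
        rw [pv_foldl_fixed (pvCleanRow row) hc [] rest]
        simp
      have hB : normalize_table_py_alt (row :: rest)
          = (pvCleanRow row, pvBody (pvCleanRow row) rest) := by
        simp only [normalize_table_py_alt, pvNorm, pvCleanRow] at *
        simp [hc]
      rw [hA, hB]

-- ===== VERDICT (by name: the statement is the Claim_ definition above) =====
theorem normalize_table_py_spec : Claim_equal_normalize_table_py := by
  intro raw _
  exact pv_main raw
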